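-- pv_equiv track=rewrite | github.com/facebookresearch/vector_db_id_compression | zuckerli-baseline/generate_graph_edgelists.py | friend_to_edgelist_repr
-- ===== SOURCE A (Python) =====
-- def friend_to_edgelist_repr(graph_friends):
--     return list(
--         sorted(
--             [v, w]
--             for v, friends in enumerate(graph_friends)
--             for w in friends
--             if w != -1
--         )
--     )
-- ===== SOURCE B (Python) =====
-- def friend_to_edgelist_repr(graph_friends):
--     # Per-vertex sorted blocks, concatenated in vertex order: since v is produced
--     # in increasing order the concatenation is already globally sorted -> no global sort.
--     out = []
--     for v, friends in enumerate(graph_friends):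
--         for w in sorted(x for x in friends if x != -1):
--             out.append([v, w])
--     return out
-- ===== Notes on version B (the rewrite author's own statement) =====
-- stated objective: faster
-- what changed: Replaces the single global sort of all edges with one pass over enumerate(graph_friends) that sorts only each vertex's filtered neighbour list and appends the blocks, relying on v being emitted in increasing order so the concatenation is already globally sorted.
import Mathlib
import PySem

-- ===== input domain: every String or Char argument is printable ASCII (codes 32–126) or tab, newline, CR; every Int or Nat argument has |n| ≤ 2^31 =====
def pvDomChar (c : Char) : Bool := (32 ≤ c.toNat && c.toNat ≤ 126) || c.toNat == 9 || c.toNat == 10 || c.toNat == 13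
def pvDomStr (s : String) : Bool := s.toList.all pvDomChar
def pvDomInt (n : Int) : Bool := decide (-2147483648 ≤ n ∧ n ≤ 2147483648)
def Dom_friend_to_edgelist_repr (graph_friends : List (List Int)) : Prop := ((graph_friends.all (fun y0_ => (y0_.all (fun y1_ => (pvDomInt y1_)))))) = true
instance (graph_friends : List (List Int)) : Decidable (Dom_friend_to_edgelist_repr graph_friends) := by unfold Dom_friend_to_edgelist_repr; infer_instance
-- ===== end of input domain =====

-- B replaces A's single global sort of all [v, w] edges with one pass over the vertices
-- that sorts only each vertex's filtered neighbour block and appends the blocks in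
-- vertex order (the vertex index increases, so the concatenation is already sorted).

-- ===== PORT A =====
-- enumerate(graph_friends): index paired with each adjacency list
def pvEnumA (i : Int) : List (List Int) → List (Int × List Int)
  | [] => []
  | f :: rest => (i, f) :: pvEnumA (i + 1) rest

def friend_to_edgelist_repr (graph_friends : List (List Int)) : List (List Int) :=
  PySem.List.sorted
    ((pvEnumA 0 graph_friends).flatMap
      (fun p => (p.2.filter (fun w => !(w == -1))).map (fun w => [p.1, w])))
    (fun x => x) false

-- ===== PORT B =====
-- for v, friends in enumerate(...): emit the per-vertex sorted block, then recurse on v+1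
def pvAltGo (v : Int) : List (List Int) → List (List Int)
  | [] => []
  | friends :: rest =>
      (PySem.List.sorted (friends.filter (fun w => !(w == -1))) (fun x => x) false).map
        (fun w => [v, w]) ++ pvAltGo (v + 1) rest

def friend_to_edgelist_repr_alt (graph_friends : List (List Int)) : List (List Int) :=
  pvAltGo 0 graph_friends

-- ===== PRECONDITION & SPEC =====
def Spec_friend_to_edgelist_repr (graph_friends : List (List Int)) (out : List (List Int)) : Prop := out = friend_to_edgelist_repr_alt graph_friends
instance (graph_friends : List (List Int)) (out : List (List Int)) : Decidable (Spec_friend_to_edgelist_repr graph_friends out) := by unfold Spec_friend_to_edgelist_repr; infer_instance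

-- ===== CLAIM (what is proved, stated in full; the proofs are below) =====
def Claim_equal_friend_to_edgelist_repr : Prop := ∀ (graph_friends : List (List Int)), Dom_friend_to_edgelist_repr graph_friends → Spec_friend_to_edgelist_repr graph_friends (friend_to_edgelist_repr graph_friends)

-- ===== LEMMAS AND PROOFS =====

-- B's output is a permutation of A's unsorted edge generator (blockwise: sorted ~ unsorted)
theorem pvAltGo_perm (gf : List (List Int)) : ∀ v : Int,
    (pvAltGo v gf).Perm ((pvEnumA v gf).flatMap
      (fun p => (p.2.filter (fun w => !(w == -1))).map (fun w => [p.1, w]))) := by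
  induction gf with
  | nil => intro v; simp [pvAltGo, pvEnumA]
  | cons f rest ih =>
    intro v
    simp only [pvAltGo, pvEnumA, List.flatMap_cons]
    exact ((PySem.List.sorted_perm _ _ _).map _).append (ih (v + 1))

-- every element of pvAltGo v gf is an edge [u, w] with v ≤ u
theorem mem_pvAltGo (gf : List (List Int)) : ∀ (v : Int) (x : List Int),
    x ∈ pvAltGo v gf → ∃ u w : Int, x = [u, w] ∧ v ≤ u := by
  induction gf with
  | nil => intro v x h; simp [pvAltGo] at h
  | cons f rest ih =>
    intro v x h
    simp only [pvAltGo, List.mem_append, List.mem_map] at h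
    rcases h with ⟨w, _, rfl⟩ | h
    · exact ⟨v, w, rfl, le_refl v⟩
    · obtain ⟨u, w, rfl, hu⟩ := ih (v + 1) x h
      exact ⟨u, w, rfl, by omega⟩

-- B's output is sorted (lexicographically ≤-pairwise): within a block the second
-- component is sorted, and across blocks the first component strictly increases
theorem pvAltGo_pairwise (gf : List (List Int)) : ∀ v : Int,
    (pvAltGo v gf).Pairwise (· ≤ ·) := by
  induction gf with
  | nil => intro v; simp [pvAltGo]
  | cons f rest ih =>
    intro v
    simp only [pvAltGo]
    rw [List.pairwise_append]
    refine ⟨?_, ih (v + 1), ?_⟩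
    · rw [List.pairwise_map]
      refine (PySem.List.sorted_pairwise (f.filter (fun w => !(w == -1))) (fun x => x)).imp ?_
      intro a b h
      rcases eq_or_lt_of_le (by simpa using h : a ≤ b) with rfl | hlt
      · exact le_refl _
      · exact le_of_lt (List.cons_lt_cons_iff.mpr (Or.inr ⟨rfl, List.cons_lt_cons_iff.mpr (Or.inl hlt)⟩))
    · rintro a ha b hb
      simp only [List.mem_map] at ha
      obtain ⟨w, _, rfl⟩ := ha
      obtain ⟨u, w', rfl, hu⟩ := mem_pvAltGo rest (v + 1) b hb
      exact le_of_lt (List.cons_lt_cons_iff.mpr (Or.inl (by omega)))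

-- PySem.List.sorted_pairwise, transported to the DecidableLT/LT instances the port elaborated with
theorem sorted_pairwise' {α κ : Type} [lo : LinearOrder κ] (ltI : LT κ) (dec : @DecidableLT κ ltI)
    (h : ltI = lo.toLT) (xs : List α) (key : α → κ) :
    List.Pairwise (fun a b => key a ≤ key b) (@PySem.List.sorted α κ ltI dec xs key false) := by
  subst h
  have hd : dec = LinearOrder.toDecidableLT := Subsingleton.elim _ _
  rw [hd]
  exact PySem.List.sorted_pairwise xs key

theorem pv_main (gf : List (List Int)) :
    friend_to_edgelist_repr gf = friend_to_edgelist_repr_alt gf := by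
  unfold friend_to_edgelist_repr friend_to_edgelist_repr_alt
  exact PySem.List.eq_of_perm_of_pairwise_le_of_injective (fun x => x)
    (fun _ _ h => h)
    ((PySem.List.sorted_perm _ _ _).trans (pvAltGo_perm gf 0).symm)
    (sorted_pairwise' _ _ rfl _ _)
    (pvAltGo_pairwise gf 0)

-- ===== VERDICT (by name: the statement is the Claim_ definition above) =====
theorem friend_to_edgelist_repr_spec : Claim_equal_friend_to_edgelist_repr := by
  intro gf _
  unfold Spec_friend_to_edgelist_repr
  exact pv_main gf
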